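-- pv_equiv track=rewrite | github.com/tplaysted/advent-of-code | 2024/day22/part_2.py | changes_to_prices
-- ===== SOURCE A (Python) =====
-- def diffs(input):  # diffs on a list
--     for i in range(1, len(input)):
--         yield input[i] - input[i-1]
--
-- def next(a):
--     x = ((a << 6) ^ a) & (2 ** 24 - 1)  # step 1
--     y = ((x >> 5) ^ x) & (2 ** 24 - 1)  # step 2
--     return ((y << 11) ^ y) & (2 ** 24 - 1)  # step 3
--
-- def changes_to_prices(a, n):  # a dict of changes to prices for a given starting number
--     secrets = [0 for _ in range(n + 1)]
--     secrets[0] = a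
--     changes = {}
--
--     for i in range(1, n + 1):
--         secrets[i] = next(secrets[i-1])
--
--     flucs = [x for x in diffs([x % 10 for x in secrets])]  # diffs but a different name
--
--     for i in range(0, n-4):
--         change = tuple(flucs[i:i+4])
--         price = secrets[i+4] % 10
--
--         if change not in changes:  # only the first price is stored
--             changes[change] = price
--
--     return changes
-- ===== SOURCE B (Python) =====
-- def next(a):
--     x = ((a << 6) ^ a) & (2 ** 24 - 1)  # step 1
--     y = ((x >> 5) ^ x) & (2 ** 24 - 1)  # step 2
--     return ((y << 11) ^ y) & (2 ** 24 - 1)  # step 3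
--
-- def changes_to_prices(a, n):
--     # one streaming pass: no secrets list, no flucs list; rolling 4-change window
--     changes = {}
--     x = a
--     prev = a % 10
--     window = ()
--     for _ in range(1, n):  # only the first n-1 generated secrets ever contribute
--         x = next(x)
--         p = x % 10
--         window = (window + (p - prev,))[-4:]
--         if len(window) == 4:
--             changes.setdefault(window, p)
--         prev = p
--     return changes
-- ===== Notes on version B (the rewrite author's own statement) =====
-- stated objective: simpler
-- what changed: B fuses A's three passes (build the secrets list, build the flucs list, scan windows by slicing) into one streaming loop that keeps only the current secret, previous price and a rolling 4-change window, using dict.setdefault; no intermediate lists are materialized.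
-- crash fix: For n < 0 A raises IndexError (secrets[0] = a on an empty list); B returns the empty dict. — e.g. on changes_to_prices(1, -1): A raises IndexError, B returns []
import Mathlib
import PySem

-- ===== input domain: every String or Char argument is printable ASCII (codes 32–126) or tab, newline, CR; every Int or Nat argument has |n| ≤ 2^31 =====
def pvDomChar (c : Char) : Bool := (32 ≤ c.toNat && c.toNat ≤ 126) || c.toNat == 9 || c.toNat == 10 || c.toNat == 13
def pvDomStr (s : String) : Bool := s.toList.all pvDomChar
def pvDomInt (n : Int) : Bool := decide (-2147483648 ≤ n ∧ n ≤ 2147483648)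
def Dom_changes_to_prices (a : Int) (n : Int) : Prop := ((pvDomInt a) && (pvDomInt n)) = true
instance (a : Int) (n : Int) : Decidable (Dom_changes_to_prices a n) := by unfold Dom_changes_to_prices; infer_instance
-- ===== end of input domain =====

-- B fuses A's three passes (secrets list, flucs list, window scan) into one streaming
-- loop with a rolling 4-change window (objective: simpler; no intermediate lists).

-- ===== PORT A =====
-- shared helper: Python `next` (the identical helper appears in both Source A and Source B)
def pyNextSecret (a : Int) : Int :=
  let x := PySem.Int.band (PySem.Int.bxor (a <<< 6) a) 16777215
  let y := PySem.Int.band (PySem.Int.bxor (x >>> 5) x) 16777215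
  PySem.Int.band (PySem.Int.bxor (y <<< 11) y) 16777215

-- generator `diffs`: yields input[i] - input[i-1] for i in range(1, len(input))
def pyDiffs (input : List Int) : List Int :=
  (PySem.List.pyRange 1 (input.length : Int) 1).map
    (fun i => PySem.List.pyGetD input i 0 - PySem.List.pyGetD input (i - 1) 0)

def changes_to_prices (a : Int) (n : Int) : List (List Int × Int) :=
  let secrets0 : List Int := (PySem.List.pyRange 0 (n + 1) 1).map (fun _ => (0 : Int))
  -- secrets[0] = a  (in range under Pre_: 0 ≤ n)
  let secrets1 := PySem.List.pySetD secrets0 0 a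
  let secrets := (PySem.List.pyRange 1 (n + 1) 1).foldl
      (fun s i => PySem.List.pySetD s i (pyNextSecret (PySem.List.pyGetD s (i - 1) 0))) secrets1
  let flucs := pyDiffs (secrets.map (fun x => PySem.Int.mod x 10))
  let changes := (PySem.List.pyRange 0 (n - 4) 1).foldl
      (fun (d : PySem.Dict (List Int) Int) i =>
        let change := PySem.List.slice flucs (some i) (some (i + 4))
        let price := PySem.Int.mod (PySem.List.pyGetD secrets (i + 4) 0) 10
        if d.contains change = false then d.insert change price else d)
      PySem.Dict.empty
  changes.items

-- ===== PORT B =====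
-- body of B's single streaming loop (state: current secret, previous price,
-- rolling window of last ≤4 changes, the changes dict)
def bStep (st : Int × Int × List Int × PySem.Dict (List Int) Int) :
    Int × Int × List Int × PySem.Dict (List Int) Int :=
  let x := pyNextSecret st.1
  let p := PySem.Int.mod x 10
  let w := PySem.List.slice (st.2.2.1 ++ [p - st.2.1]) (some (-4)) none
  let changes := if w.length = 4 then st.2.2.2.setdefault w p else st.2.2.2
  (x, p, w, changes)

def changes_to_prices_alt (a : Int) (n : Int) : List (List Int × Int) :=
  ((PySem.List.pyRange 1 n 1).foldl (fun st _ => bStep st)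
    (a, PySem.Int.mod a 10, ([] : List Int),
      (PySem.Dict.empty : PySem.Dict (List Int) Int))).2.2.2.items

-- ===== PRECONDITION & SPEC =====
-- Pre_ excludes exactly n < 0, where A raises IndexError (secrets[0] = a on an empty list).
def Pre_changes_to_prices (a : Int) (n : Int) : Prop := 0 ≤ n
instance (a : Int) (n : Int) : Decidable (Pre_changes_to_prices a n) := by
  unfold Pre_changes_to_prices; infer_instance
def pvWitness_changes_to_prices : Int × Int := (123, 10)

-- For n < 0 A raises IndexError (secrets[0] = a on an empty list); B returns the empty dict.
def Raises_changes_to_prices (a : Int) (n : Int) : Prop := n < 0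
instance (a : Int) (n : Int) : Decidable (Raises_changes_to_prices a n) := by
  unfold Raises_changes_to_prices; infer_instance
def pvRaiseWitness_changes_to_prices : Int × Int := (1, -1)
def pvRaiseWitnessOut_changes_to_prices : List (List Int × Int) := []

def Spec_changes_to_prices (a : Int) (n : Int) (out : List (List Int × Int)) : Prop :=
  out = changes_to_prices_alt a n
instance (a : Int) (n : Int) (out : List (List Int × Int)) :
    Decidable (Spec_changes_to_prices a n out) := by
  unfold Spec_changes_to_prices; infer_instance

-- ===== CLAIM (what is proved, stated in full; the proofs are below) =====
def Claim_equal_changes_to_prices : Prop := ∀ (a : Int) (n : Int), Dom_changes_to_prices a n →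
  Pre_changes_to_prices a n → Spec_changes_to_prices a n (changes_to_prices a n)
def Claim_raises_changes_to_prices : Prop :=
  (∀ (a : Int) (n : Int), Dom_changes_to_prices a n → Raises_changes_to_prices a n →
    ¬ Pre_changes_to_prices a n) ∧
  (Dom_changes_to_prices (pvRaiseWitness_changes_to_prices.1) (pvRaiseWitness_changes_to_prices.2) ∧
   Raises_changes_to_prices (pvRaiseWitness_changes_to_prices.1) (pvRaiseWitness_changes_to_prices.2) ∧
   changes_to_prices_alt (pvRaiseWitness_changes_to_prices.1) (pvRaiseWitness_changes_to_prices.2) =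
     pvRaiseWitnessOut_changes_to_prices)

-- ===== LEMMAS AND PROOFS =====

-- the mathematical secret sequence, its prices, price changes, and window/price pairs
def sFun (a : Int) : Nat → Int
  | 0 => a
  | k + 1 => pyNextSecret (sFun a k)
def pFun (a : Int) (k : Nat) : Int := PySem.Int.mod (sFun a k) 10
def dFun (a : Int) (i : Nat) : Int := pFun a (i + 1) - pFun a i
def gPair (a : Int) (i : Nat) : List Int × Int :=
  ([dFun a i, dFun a (i + 1), dFun a (i + 2), dFun a (i + 3)], pFun a (i + 4))
-- one `setdefault` step of the dict-building loop, and the common pair stream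
def sdStep (d : PySem.Dict (List Int) Int) (cp : List Int × Int) : PySem.Dict (List Int) Int :=
  if d.contains cp.1 = false then d.insert cp.1 cp.2 else d
def pairsD (a : Int) (m : Nat) : List (List Int × Int) := (List.range m).map (gPair a)

-- A's secrets-building loop produces [sFun a 0, …, sFun a m] (plus untouched zeros)
theorem secrets_fold (a : Int) (N : Nat) (m : Nat) (hm : m ≤ N) :
  (PySem.List.pyRange 1 ((m:Int)+1) 1).foldl
    (fun s i => PySem.List.pySetD s i (pyNextSecret (PySem.List.pyGetD s (i-1) 0)))
    (a :: List.replicate N 0)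
  = (List.range (m+1)).map (sFun a) ++ List.replicate (N - m) 0 := by
  induction m with
  | zero =>
      rw [PySem.List.pyRange_one_eq_nil (by omega)]
      simp [List.range_one, sFun]
  | succ m ih =>
      have h1 : ((m+1:Nat):Int)+1 = ((m:Int)+1)+1 := by push_cast; ring
      rw [h1, PySem.List.pyRange_one_succ_right (by omega), List.foldl_append, ih (by omega)]
      simp only [List.foldl_cons, List.foldl_nil]
      have h2 : (m:Int)+1-1 = ((m:Nat):Int) := by ring
      rw [h2, PySem.List.pyGetD_natCast]
      have hlen : ((List.range (m+1)).map (sFun a)).length = m + 1 := by simp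
      have hget : (((List.range (m+1)).map (sFun a)) ++ List.replicate (N - m) (0:Int)).getD m 0
          = sFun a m := by
        rw [List.getD_append _ _ _ _ (by simp)]
        simp [List.getD_eq_getElem?_getD]
      rw [hget]
      have h3 : ((m:Int)+1) = ((m+1:Nat):Int) := by push_cast; ring
      rw [h3, PySem.List.pySetD_natCast]
      rw [List.set_append_right _ _ (by simp)]
      have h4 : N - m = (N - (m+1)) + 1 := by omega
      rw [hlen, h4, List.replicate_succ]
      simp only [Nat.sub_self, List.set_cons_zero]
      rw [List.range_succ (n := m+1), List.map_append, List.append_assoc]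
      rfl

theorem getD_map_range_p (f : Nat → Int) (M j : Nat) (h : j < M) :
    ((List.range M).map f).getD j 0 = f j := by
  simp [List.getD_eq_getElem?_getD, h]

-- A's flucs list is the stream of price changes dFun a 0, …, dFun a (N-1)
theorem flucs_eq (a : Int) (N : Nat) :
    pyDiffs (((List.range (N+1)).map (sFun a)).map (fun x => PySem.Int.mod x 10))
      = (List.range N).map (dFun a) := by
  have hpr : ((List.range (N+1)).map (sFun a)).map (fun x => PySem.Int.mod x 10)
      = (List.range (N+1)).map (pFun a) := by
    rw [List.map_map]; rfl
  rw [pyDiffs, hpr]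
  have hlen : (((List.range (N+1)).map (pFun a)).length : Int) = ((N+1:Nat):Int) := by simp
  rw [hlen, PySem.List.pyRange_one, List.map_map]
  have ht : (((N+1:Nat):Int) - 1).toNat = N := by omega
  rw [ht]
  apply List.map_congr_left
  intro k hk
  rw [List.mem_range] at hk
  simp only [Function.comp]
  have h1 : (1:Int) + (k:Int) = ((k+1:Nat):Int) := by push_cast; ring
  have h2 : ((k+1:Nat):Int) - 1 = ((k:Nat):Int) := by push_cast; ring
  rw [h1, h2, PySem.List.pyGetD_natCast, PySem.List.pyGetD_natCast,
     getD_map_range_p _ _ _ (by omega), getD_map_range_p _ _ _ (by omega)]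
  rfl

theorem range'_four (k : Nat) : List.range' k 4 = [k, k+1, k+2, k+3] := by
  simp [List.range']

-- A's window-scanning loop is the sdStep-fold over the pair stream (range(0, n-4) ⇒ N-4 pairs)
theorem loop_A (a : Int) (N : Nat) :
    (PySem.List.pyRange 0 ((N:Int)-4) 1).foldl
      (fun (d : PySem.Dict (List Int) Int) i =>
        if d.contains (PySem.List.slice ((List.range N).map (dFun a)) (some i) (some (i+4))) = false
        then d.insert (PySem.List.slice ((List.range N).map (dFun a)) (some i) (some (i+4)))
               (PySem.Int.mod (PySem.List.pyGetD ((List.range (N+1)).map (sFun a)) (i+4) 0) 10)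
        else d)
      PySem.Dict.empty
    = (pairsD a (N-4)).foldl sdStep PySem.Dict.empty := by
  by_cases h4 : N ≤ 4
  · rw [PySem.List.pyRange_one_eq_nil (by omega)]
    have : N - 4 = 0 := by omega
    rw [this]
    simp [pairsD]
  · have hc : (N:Int) - 4 = ((N-4:Nat):Int) := by omega
    rw [hc, PySem.List.pyRange_zero_natCast, List.foldl_map]
    rw [pairsD, List.foldl_map]
    apply PySem.List.foldl_congr_mem
    intro d k hk
    rw [List.mem_range] at hk
    have h1 : ((k:Nat):Int) + 4 = ((k:Nat):Int) + ((4:Nat):Int) := by norm_num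
    rw [h1, PySem.List.slice_natCast_add, ← List.map_drop]
    have hdr : List.drop k (List.range N) = List.range' k 4 ++ List.range' (k+4) (N-k-4) := by
      rw [List.range_eq_range', List.drop_range', List.range'_append]
      congr 1
      · omega
      · omega
    rw [hdr, List.map_append]
    rw [List.take_left' (by simp), range'_four]
    have h2 : ((k:Nat):Int) + ((4:Nat):Int) = ((k+4:Nat):Int) := by push_cast; ring
    rw [h2, PySem.List.pyGetD_natCast, getD_map_range_p _ _ _ (by omega)]
    simp [sdStep, gPair, pFun, dFun]

theorem portA_eq (a : Int) (n : Int) (h : 0 ≤ n) :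
    changes_to_prices a n = ((pairsD a (n - 4).toNat).foldl sdStep PySem.Dict.empty).items := by
  obtain ⟨N, rfl⟩ := Int.eq_ofNat_of_zero_le h
  have ht : ((N:Int) - 4).toNat = N - 4 := by omega
  rw [ht]
  simp only [changes_to_prices]
  have hs0 : (PySem.List.pyRange 0 ((N:Int)+1) 1).map (fun _ => (0:Int))
      = List.replicate (N+1) 0 := by
    rw [show ((N:Int)+1) = ((N+1:Nat):Int) by push_cast; ring,
       PySem.List.pyRange_zero_natCast, List.map_map]
    simp only [Function.comp_def]
    rw [List.map_const']
    simp
  rw [hs0]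
  have hs1 : PySem.List.pySetD (List.replicate (N+1) (0:Int)) 0 a
      = a :: List.replicate N 0 := by
    rw [PySem.List.pySetD_of_nonneg _ _ (by norm_num), List.replicate_succ]
    simp
  rw [hs1, secrets_fold a N N le_rfl]
  simp only [Nat.sub_self, List.replicate_zero, List.append_nil]
  rw [flucs_eq, loop_A]

-- the rolling window B maintains: the last ≤4 price changes
def winL (a : Int) (m : Nat) : List Int := ((List.range m).map (dFun a)).drop (m - 4)

theorem setdefault_eq_sdStep (d : PySem.Dict (List Int) Int) (k : List Int) (v : Int) :
    d.setdefault k v = sdStep d (k, v) := by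
  by_cases h : d.contains k = true
  · simp [sdStep, h, pysem]
  · simp only [Bool.not_eq_true] at h
    simp [sdStep, h, pysem]

theorem winL_step (a : Int) (m : Nat) :
    PySem.List.slice (winL a m ++ [dFun a m]) (some (-4)) none = winL a (m+1) := by
  rw [winL, ← List.drop_append_of_le_length (by simp),
     show [dFun a m] = (List.map (dFun a) [m]) from rfl, ← List.map_append, ← List.range_succ]
  rw [PySem.List.slice_from_neg_ofNat _ 4 (by norm_num), List.drop_drop]
  rw [winL]
  congr 1
  simp
  omega

theorem winL_len (a : Int) (m : Nat) : (winL a m).length = min m 4 := by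
  simp [winL]
  omega

theorem winL_full (a : Int) (j : Nat) :
    winL a (j+4) = [dFun a j, dFun a (j+1), dFun a (j+2), dFun a (j+3)] := by
  rw [winL, ← List.map_drop, List.range_eq_range', List.drop_range']
  have h1 : j + 4 - 4 = j := by omega
  have h2 : 0 + j * 1 = j := by omega
  have h3 : j + 4 - j = 4 := by omega
  rw [h1, h2, h3, range'_four]
  rfl

-- B's loop invariant after m steps
theorem inv_B (a : Int) (m : Nat) :
    (PySem.List.pyRange 1 (1 + (m:Int)) 1).foldl (fun st _ => bStep st)
      (a, PySem.Int.mod a 10, ([] : List Int), (PySem.Dict.empty : PySem.Dict (List Int) Int))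
    = (sFun a m, pFun a m, winL a m, (pairsD a (m-3)).foldl sdStep PySem.Dict.empty) := by
  induction m with
  | zero =>
      rw [PySem.List.pyRange_one_eq_nil (by omega)]
      simp [sFun, pFun, winL, pairsD]
  | succ m ih =>
      have h1 : 1 + ((m+1:Nat):Int) = (1 + (m:Int)) + 1 := by push_cast; ring
      rw [h1, PySem.List.pyRange_one_succ_right (by omega), List.foldl_append, ih]
      simp only [List.foldl_cons, List.foldl_nil]
      rw [bStep]
      simp only []
      have hd : PySem.Int.mod (pyNextSecret (sFun a m)) 10 - pFun a m = dFun a m := rfl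
      rw [hd, winL_step]
      by_cases h3 : 3 ≤ m
      · obtain ⟨j, rfl⟩ : ∃ j, m = j + 3 := ⟨m - 3, by omega⟩
        rw [if_pos (by rw [winL_len]; omega)]
        have he : j + 3 + 1 = j + 4 := by omega
        have he2 : j + 3 + 1 - 3 = j + 1 := by omega
        have he3 : j + 3 - 3 = j := by omega
        rw [he, he2, he3, winL_full]
        simp only [pairsD, List.range_succ, List.map_append, List.foldl_append,
          List.map_cons, List.map_nil, List.foldl_cons, List.foldl_nil]
        rw [setdefault_eq_sdStep]
        rfl
      · rw [if_neg (by rw [winL_len]; omega)]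
        have he : m + 1 - 3 = 0 := by omega
        have he2 : m - 3 = 0 := by omega
        rw [he, he2]
        rfl

theorem portB_eq (a : Int) (n : Int) (h : 0 ≤ n) :
    changes_to_prices_alt a n = ((pairsD a (n - 4).toNat).foldl sdStep PySem.Dict.empty).items := by
  obtain ⟨N, rfl⟩ := Int.eq_ofNat_of_zero_le h
  have ht : ((N:Int) - 4).toNat = N - 4 := by omega
  rw [changes_to_prices_alt, ht]
  rcases Nat.eq_zero_or_pos N with hN | hN
  · subst hN
    rw [PySem.List.pyRange_one_eq_nil (by omega)]
    simp [pairsD]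
  · have h1 : (N:Int) = 1 + ((N-1:Nat):Int) := by omega
    rw [h1, inv_B]
    have h2 : N - 1 - 3 = N - 4 := by omega
    rw [h2]

-- ===== VERDICT (by name: the statement is the Claim_ definition above) =====
theorem changes_to_prices_spec : Claim_equal_changes_to_prices := by
  intro a n _ hpre
  unfold Spec_changes_to_prices
  rw [portA_eq a n hpre, portB_eq a n hpre]

theorem changes_to_prices_raises : Claim_raises_changes_to_prices := by
  unfold Claim_raises_changes_to_prices
  exact ⟨fun a n _ hr => by
      unfold Raises_changes_to_prices at hr; unfold Pre_changes_to_prices; omega,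
    by decide⟩

-- self-check: B's port really returns the stated value at the raise witness (uses the theorem above)
theorem changes_to_prices_raises_witness :
    changes_to_prices_alt 1 (-1) = [] := changes_to_prices_raises.2.2.2
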